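-- pv_equiv track=rewrite | github.com/bvandenabbeele/AdventOfCode | 2025/day_04/main.py | part_1
-- ===== SOURCE A (Python) =====
-- def box_sum(box, i_rng, j_rng):
--     total = 0
--     for line in box[i_rng[0]:i_rng[1]+1]:
--         total += sum(line[j_rng[0]:j_rng[1]+1])
--
--     return total
--
-- def part_1(data: list[list[int]]) -> int:
--     rolls = 0
--     for i in range(len(data)):
--         i_rng = max(0, i-1), min(i+1, len(data)-1)
--         for j in range(len(data[i])):
--             if data[i][j]:
--                 j_rng = max(0, j-1), min(j+1, len(data[i])-1)
--                 if box_sum(data, i_rng, j_rng) < 5: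
--                     rolls += 1
--
--     return rolls
-- ===== SOURCE B (Python) =====
-- def part_1(data: list[list[int]]) -> int:
--     # Per-row prefix sums; each window sum is then two O(1) lookups per row.
--     pre = []
--     for row in data:
--         p = [0]
--         for v in row:
--             p.append(p[-1] + v)
--         pre.append(p)
--     h = len(data)
--     rolls = 0
--     for i, row in enumerate(data):
--         w = len(row)
--         for j, v in enumerate(row):
--             if v:
--                 j1 = max(0, j - 1)
--                 j2 = min(j + 1, w - 1)
--                 total = 0
--                 for r in range(max(0, i - 1), min(i + 1, h - 1) + 1):
--                     p = pre[r]
--                     L = len(p) - 1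
--                     total += p[min(j2 + 1, L)] - p[min(j1, L)]
--                 if total < 5:
--                     rolls += 1
--     return rolls
-- ===== Notes on version B (the rewrite author's own statement) =====
-- stated objective: alternative
-- what changed: B precomputes a prefix-sum table for every row once, then obtains each clamped 3x3-window row-sum as a difference of two table lookups instead of re-slicing the grid per cell as A's box_sum does.
import Mathlib
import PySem

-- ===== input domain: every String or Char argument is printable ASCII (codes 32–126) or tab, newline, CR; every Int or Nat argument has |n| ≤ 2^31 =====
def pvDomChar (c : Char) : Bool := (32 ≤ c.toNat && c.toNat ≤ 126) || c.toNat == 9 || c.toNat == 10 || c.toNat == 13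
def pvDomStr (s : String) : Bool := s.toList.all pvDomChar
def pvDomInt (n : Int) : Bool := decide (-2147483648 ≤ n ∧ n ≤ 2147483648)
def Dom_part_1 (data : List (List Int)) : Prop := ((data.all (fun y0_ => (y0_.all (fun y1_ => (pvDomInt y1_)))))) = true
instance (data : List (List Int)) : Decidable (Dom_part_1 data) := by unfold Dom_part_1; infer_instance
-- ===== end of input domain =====

-- B replaces A's per-cell 3x3 re-slicing (box_sum) by per-row prefix-sum tables built once,
-- so each window row-sum is a difference of two table lookups (objective: alternative).

-- ===== PORT A =====
def box_sum (box : List (List Int)) (i_rng j_rng : Int × Int) : Int :=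
  (PySem.List.slice box (some i_rng.1) (some (i_rng.2 + 1))).foldl
    (fun total line => total + (PySem.List.slice line (some j_rng.1) (some (j_rng.2 + 1))).sum) 0

def part_1 (data : List (List Int)) : Int :=
  (PySem.List.pyRange 0 (data.length : Int)).foldl (fun rolls i =>
    let i_rng : Int × Int := (max 0 (i - 1), min (i + 1) ((data.length : Int) - 1))
    let row := PySem.List.pyGetD data i []
    (PySem.List.pyRange 0 (row.length : Int)).foldl (fun rolls j =>
      if PySem.List.pyGetD row j 0 ≠ 0 then
        let j_rng : Int × Int := (max 0 (j - 1), min (j + 1) ((row.length : Int) - 1))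
        if box_sum data i_rng j_rng < 5 then rolls + 1 else rolls
      else rolls) rolls) 0

-- ===== PORT B =====
-- p = [0]; for v in row: p.append(p[-1] + v)
def pvPrefix (row : List Int) : List Int :=
  row.foldl (fun p v => p ++ [PySem.List.pyGetD p (-1) 0 + v]) [0]

def part_1_alt (data : List (List Int)) : Int :=
  let pre := data.map pvPrefix
  let h := data.length
  (PySem.List.enumerate data).foldl (fun rolls irow =>
    let i := irow.1
    let row := irow.2
    let w := row.length
    (PySem.List.enumerate row).foldl (fun rolls jv =>
      if jv.2 ≠ 0 then
        let j1 : Int := max 0 (jv.1 - 1)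
        let j2 : Int := min (jv.1 + 1) ((w : Int) - 1)
        let total :=
          (PySem.List.pyRange (max 0 (i - 1)) (min (i + 1) ((h : Int) - 1) + 1)).foldl
            (fun t r =>
              let p := PySem.List.pyGetD pre r []
              let L : Int := (p.length : Int) - 1
              t + (PySem.List.pyGetD p (min (j2 + 1) L) 0 - PySem.List.pyGetD p (min j1 L) 0)) 0
        if total < 5 then rolls + 1 else rolls
      else rolls) rolls) 0

-- ===== PRECONDITION & SPEC =====
def Spec_part_1 (data : List (List Int)) (out : Int) : Prop := out = part_1_alt data
instance (data : List (List Int)) (out : Int) : Decidable (Spec_part_1 data out) := by unfold Spec_part_1; infer_instance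

-- ===== CLAIM (what is proved, stated in full; the proofs are below) =====
def Claim_equal_part_1 : Prop := ∀ (data : List (List Int)), Dom_part_1 data → Spec_part_1 data (part_1 data)

-- ===== LEMMAS AND PROOFS =====

-- running partial sums of `row` starting from `s` (the tail of a prefix-sum table)
def pvPartials : List Int → Int → List Int
  | [], _ => []
  | v :: vs, s => (s + v) :: pvPartials vs (s + v)

theorem pvPyGetD_neg_one_append (q : List Int) (s : Int) :
    PySem.List.pyGetD (q ++ [s]) (-1) 0 = s := by
  simp [PySem.List.pyGetD, PySem.List.pyGet?, PySem.List.pyIdx?]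

theorem pvPrefix_foldl (row : List Int) : ∀ (q : List Int) (s : Int),
    List.foldl (fun p v => p ++ [PySem.List.pyGetD p (-1) 0 + v]) (q ++ [s]) row
      = q ++ [s] ++ pvPartials row s := by
  induction row with
  | nil => intro q s; simp [pvPartials]
  | cons v vs ih =>
      intro q s
      simp only [List.foldl_cons, pvPartials]
      rw [pvPyGetD_neg_one_append]
      have := ih (q ++ [s]) (s + v)
      simpa [List.append_assoc] using this

theorem pvPrefix_eq (row : List Int) : pvPrefix row = 0 :: pvPartials row 0 := by
  have := pvPrefix_foldl row [] 0
  simpa [pvPrefix] using this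

theorem pvPartials_length (row : List Int) : ∀ s, (pvPartials row s).length = row.length := by
  induction row with
  | nil => intro s; rfl
  | cons v vs ih => intro s; simp [pvPartials, ih]

theorem pvPartials_getD (row : List Int) : ∀ (s : Int) (k : Nat), k < row.length →
    (pvPartials row s).getD k 0 = s + (row.take (k + 1)).sum := by
  induction row with
  | nil => intro s k h; simp at h
  | cons v vs ih =>
      intro s k h
      cases k with
      | zero => simp [pvPartials]
      | succ k =>
          have hk : k < vs.length := by simpa using h
          simp only [pvPartials, List.getD_cons_succ, List.take_succ_cons, List.sum_cons]
          rw [ih (s + v) k hk]; ring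

theorem pvPrefix_length (row : List Int) : (pvPrefix row).length = row.length + 1 := by
  simp [pvPrefix_eq, pvPartials_length]

theorem pvPrefix_getD (row : List Int) (k : Nat) (hk : k ≤ row.length) :
    (pvPrefix row).getD k 0 = (row.take k).sum := by
  rw [pvPrefix_eq]
  cases k with
  | zero => simp
  | succ k =>
      have hk' : k < row.length := by omega
      simp only [List.getD_cons_succ]
      rw [pvPartials_getD row 0 k hk']; ring

-- pyRange over Nat-cast bounds is a mapped range'
theorem pvPyRange_natCast (a b : Nat) :
    PySem.List.pyRange (a : Int) (b : Int) = (List.range' a (b - a)).map (Nat.cast : Nat → Int) := by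
  by_cases hab : b ≤ a
  · rw [PySem.List.pyRange_one_eq_nil (by exact_mod_cast hab)]
    simp [Nat.sub_eq_zero_of_le hab]
  · rw [Nat.not_le] at hab
    obtain ⟨n, hn⟩ : ∃ n, b - a = n + 1 := ⟨b - a - 1, by omega⟩
    rw [hn]
    induction n generalizing a with
    | zero =>
        have hb : b = a + 1 := by omega
        subst hb
        rw [PySem.List.pyRange_one_cons (by omega)]
        rw [PySem.List.pyRange_one_eq_nil (by omega)]
        simp [List.range']
    | succ m ih =>
        rw [PySem.List.pyRange_one_cons (by exact_mod_cast hab)]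
        have h1 : ((a : Int) + 1) = ((a + 1 : Nat) : Int) := by push_cast; ring
        rw [h1, ih (a + 1) (by omega) (by omega)]
        simp [List.range'_succ]

theorem pvTake_drop_eq_map_range' {α : Type} (xs : List α) (d : α) (a n : Nat)
    (h : a + n ≤ xs.length) :
    (xs.drop a).take n = (List.range' a n).map (fun r => xs.getD r d) := by
  apply List.ext_getElem
  · simp; omega
  · intro i h1 h2
    have hi : i < n := by simpa using h2
    have : a + i < xs.length := by omega
    simp [List.getElem_drop, List.getElem_take, List.getElem_range',
      List.getElem?_eq_getElem this]

-- sum of a clamped window of a row, from its prefix table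
theorem pvRow_window (row : List Int) (u t : Nat) (hut : u ≤ t) :
    PySem.List.pyGetD (pvPrefix row) (min (t : Int) (row.length : Int)) 0
      - PySem.List.pyGetD (pvPrefix row) (min (u : Int) (row.length : Int)) 0
      = ((row.drop u).take (t - u)).sum := by
  have hcast : ∀ k : Nat, (min (k : Int) (row.length : Int)) = ((min k row.length : Nat) : Int) := by
    intro k; omega
  have hget : ∀ k : Nat, PySem.List.pyGetD (pvPrefix row) (min (k : Int) (row.length : Int)) 0
      = (row.take (min k row.length)).sum := by
    intro k
    rw [hcast k, PySem.List.pyGetD_natCast, pvPrefix_getD row _ (by omega)]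
  have htake : ∀ k : Nat, row.take (min k row.length) = row.take k := by
    intro k
    rcases le_or_gt k row.length with h | h
    · rw [Nat.min_eq_left h]
    · rw [Nat.min_eq_right (by omega), List.take_of_length_le (le_refl _),
        List.take_of_length_le (by omega)]
  rw [hget t, hget u, htake t, htake u]
  have hsplit : row.take t = row.take u ++ (row.drop u).take (t - u) := by
    have := List.take_add (l := row) (i := u) (j := t - u)
    rwa [Nat.add_sub_cancel' hut] at this
  rw [hsplit, List.sum_append]; ring

-- the per-cell equality: A's box_sum equals B's prefix-table total
theorem pvBox_eq (data : List (List Int)) (i j : Int) (hi0 : 0 ≤ i) (hiH : i < (data.length : Int))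
    (w : Nat) (hw : w = (PySem.List.pyGetD data i []).length)
    (hj0 : 0 ≤ j) (hjw : j < (w : Int)) :
    box_sum data (max 0 (i - 1), min (i + 1) ((data.length : Int) - 1))
      (max 0 (j - 1), min (j + 1) ((w : Int) - 1))
    = (PySem.List.pyRange (max 0 (i - 1)) (min (i + 1) ((data.length : Int) - 1) + 1)).foldl
        (fun t r =>
          let p := PySem.List.pyGetD (data.map pvPrefix) r []
          let L : Int := (p.length : Int) - 1
          t + (PySem.List.pyGetD p (min ((min (j + 1) ((w : Int) - 1)) + 1) L) 0
                - PySem.List.pyGetD p (min (max 0 (j - 1)) L) 0)) 0 := by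
  set H := data.length with hH
  have hH1 : 1 ≤ H := by omega
  have hw1 : 1 ≤ w := by omega
  set a := i.toNat - 1 with ha
  set b := min (i.toNat + 1) (H - 1) + 1 with hb
  have hab : a ≤ b := by omega
  have hbH : b ≤ H := by omega
  have e1 : (max 0 (i - 1)) = ((a : Int)) := by omega
  have e2' : (min (i + 1) ((H : Int) - 1)) + 1 = ((b : Int)) := by omega
  set u := j.toNat - 1 with hu
  set t := min (j.toNat + 1) (w - 1) + 1 with ht
  have hut : u ≤ t := by omega
  have e4 : (max 0 (j - 1)) = ((u : Int)) := by omega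
  have e5 : (min (j + 1) ((w : Int) - 1) + 1) = ((t : Int)) := by omega
  rw [box_sum]
  simp only [e1, e2', e4, e5]
  -- A side
  rw [PySem.List.slice_natCast data a b,
      pvTake_drop_eq_map_range' data [] a (b - a) (by omega)]
  rw [List.foldl_map, PySem.List.foldl_add]
  -- B side
  rw [pvPyRange_natCast a b, List.foldl_map, PySem.List.foldl_add]
  simp only [zero_add]
  congr 1
  apply List.map_congr_left
  intro r hr
  have hrb : a ≤ r ∧ r < a + (b - a) := List.mem_range'_1.mp hr
  have hrH : r < H := by omega
  have hrow : PySem.List.pyGetD (data.map pvPrefix) (r : Int) [] = pvPrefix (data.getD r []) := by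
    rw [PySem.List.pyGetD_natCast]
    rw [List.getD_eq_getElem _ _ (by simpa using hrH), List.getElem_map,
        List.getD_eq_getElem _ _ hrH]
  simp only [hrow]
  set row := data.getD r [] with hrowdef
  have hL : ((pvPrefix row).length : Int) - 1 = (row.length : Int) := by
    rw [pvPrefix_length]; push_cast; ring
  rw [hL, PySem.List.slice_natCast row u t, pvRow_window row u t hut]

-- ===== VERDICT (by name: the statement is the Claim_ definition above) =====
theorem part_1_spec : Claim_equal_part_1 := by
  intro data _
  unfold Spec_part_1 part_1 part_1_alt
  dsimp only
  rw [PySem.List.enumerate_eq_map_pyRange data [], List.foldl_map, PySem.List.len]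
  apply PySem.List.foldl_congr_mem
  intro rolls i hi
  have hi' := PySem.List.mem_pyRange_one.mp hi
  dsimp only
  rw [PySem.List.enumerate_eq_map_pyRange (PySem.List.pyGetD data i []) 0, List.foldl_map,
      PySem.List.len]
  apply PySem.List.foldl_congr_mem
  intro racc j hj
  have hj' := PySem.List.mem_pyRange_one.mp hj
  by_cases hnz : PySem.List.pyGetD (PySem.List.pyGetD data i []) j 0 ≠ 0
  · rw [if_pos hnz, if_pos hnz,
      pvBox_eq data i j hi'.1 hi'.2 _ rfl hj'.1 hj'.2]
  · simp only [ne_eq, not_not] at hnz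
    simp [hnz]
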